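-- pv_equiv track=rewrite | github.com/m-tkach/ProjectEuler | [070] Totient permutation/main.py | to_sorted_list
-- ===== SOURCE A (Python) =====
-- def to_sorted_list(x):
--     if x == 0:
--         return [0]
--     res = []
--     while x > 0:
--         res.append(x % 10)
--         x //= 10
--     res.sort()
--     return res
-- ===== SOURCE B (Python) =====
-- def to_sorted_list(x):
--     if x == 0:
--         return [0]
--     counts = [0] * 10
--     while x > 0:
--         counts[x % 10] += 1
--         x //= 10
--     res = []
--     for d in range(10):
--         res += [d] * counts[d]
--     return res
-- ===== Notes on version B (the rewrite author's own statement) =====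
-- stated objective: alternative
-- what changed: replaces collect-digits-then-comparison-sort with a counting sort: a ten-slot tally updated in the digit loop, then the result is rebuilt in order by concatenating replicated digits
import Mathlib
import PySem

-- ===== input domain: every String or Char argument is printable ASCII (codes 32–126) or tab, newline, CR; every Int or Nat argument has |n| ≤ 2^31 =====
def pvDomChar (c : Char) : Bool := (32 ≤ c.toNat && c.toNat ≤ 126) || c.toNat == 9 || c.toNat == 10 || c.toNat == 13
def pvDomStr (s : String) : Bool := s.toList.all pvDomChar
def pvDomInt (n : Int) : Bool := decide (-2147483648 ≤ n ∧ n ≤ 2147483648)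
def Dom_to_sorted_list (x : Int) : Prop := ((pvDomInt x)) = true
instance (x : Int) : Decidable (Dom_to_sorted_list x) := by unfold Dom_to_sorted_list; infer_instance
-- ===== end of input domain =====

-- B replaces collect-digits-then-sort with a counting sort over a 10-slot tally (objective: alternative).

-- ===== PORT A =====
-- the 'while x > 0: res.append(x % 10); x //= 10' loop
def pvDigitsLoopA (x : Int) (res : List Int) : List Int :=
  if h : 0 < x then
    pvDigitsLoopA (PySem.Int.floordiv x 10) (res ++ [PySem.Int.mod x 10])
  else res
termination_by x.toNat
decreasing_by
  rw [PySem.Int.floordiv_eq_ediv_of_pos (by norm_num)]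
  omega

def to_sorted_list (x : Int) : List Int :=
  if x = 0 then [0]
  else PySem.List.sorted (pvDigitsLoopA x []) (fun d => d) false

-- ===== PORT B =====
-- the 'while x > 0: counts[x % 10] += 1; x //= 10' loop; counts has length 10 and the
-- index x % 10 is in [0, 10), so List.set/List.getD with the (nonnegative) index is exact
def pvCountsLoop (x : Int) (counts : List Int) : List Int :=
  if h : 0 < x then
    pvCountsLoop (PySem.Int.floordiv x 10)
      (counts.set (PySem.Int.mod x 10).toNat
        (counts.getD (PySem.Int.mod x 10).toNat 0 + 1))
  else counts
termination_by x.toNat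
decreasing_by
  rw [PySem.Int.floordiv_eq_ediv_of_pos (by norm_num)]
  omega

def to_sorted_list_alt (x : Int) : List Int :=
  if x = 0 then [0]
  else
    let counts := pvCountsLoop x (List.replicate 10 0)
    -- 'for d in range(10): res += [d] * counts[d]'; counts[d] ≥ 0 so .toNat is exact
    (PySem.List.pyRange 0 10 1).foldl
      (fun res d => res ++ List.replicate (counts.getD d.toNat 0).toNat d) []

-- ===== PRECONDITION & SPEC =====
def Spec_to_sorted_list (x : Int) (out : List Int) : Prop := out = to_sorted_list_alt x
instance (x : Int) (out : List Int) : Decidable (Spec_to_sorted_list x out) := by unfold Spec_to_sorted_list; infer_instance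

-- ===== CLAIM (what is proved, stated in full; the proofs are below) =====
def Claim_equal_to_sorted_list : Prop := ∀ (x : Int), Dom_to_sorted_list x → Spec_to_sorted_list x (to_sorted_list x)

-- ===== LEMMAS AND PROOFS =====

-- the digit list of x (proof-side characterisation of A's loop)
def pvDigits (x : Int) : List Int :=
  if h : 0 < x then PySem.Int.mod x 10 :: pvDigits (PySem.Int.floordiv x 10) else []
termination_by x.toNat
decreasing_by
  rw [PySem.Int.floordiv_eq_ediv_of_pos (by norm_num)]
  omega

lemma pvDigitsLoopA_eq (x : Int) : ∀ res, pvDigitsLoopA x res = res ++ pvDigits x := by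
  induction x using pvDigits.induct with
  | case1 x h ih =>
    intro res
    rw [pvDigitsLoopA, pvDigits, dif_pos h, dif_pos h, ih]
    simp
  | case2 x h =>
    intro res
    rw [pvDigitsLoopA, pvDigits, dif_neg h, dif_neg h]
    simp

lemma pvDigits_mem (x : Int) : ∀ d ∈ pvDigits x, 0 ≤ d ∧ d < 10 := by
  induction x using pvDigits.induct with
  | case1 x h ih =>
    intro d hd
    rw [pvDigits, dif_pos h] at hd
    rcases List.mem_cons.mp hd with rfl | hd'
    · exact ⟨PySem.Int.mod_nonneg x (by norm_num), PySem.Int.mod_lt x (by norm_num)⟩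
    · exact ih _ hd'
  | case2 x h =>
    intro d hd
    rw [pvDigits, dif_neg h] at hd
    simp at hd

lemma getD_set' (l : List Int) (i j : Nat) (v d : Int) (h : i < l.length) :
    (l.set i v).getD j d = if j = i then v else l.getD j d := by
  simp [List.getD_eq_getElem?_getD, List.getElem?_set]
  rcases eq_or_ne i j with rfl | hne
  · simp [h]
  · simp [hne, Ne.symm hne]

lemma pvCountsLoop_getD (x : Int) : ∀ counts : List Int, counts.length = 10 →
    (pvCountsLoop x counts).length = 10 ∧
    ∀ i : Nat, i < 10 →
      (pvCountsLoop x counts).getD i 0 =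
        counts.getD i 0 + ((pvDigits x).count (i : Int) : Int) := by
  induction x using pvDigits.induct with
  | case1 x h ih =>
    intro counts hlen
    have hm0 : (0:Int) ≤ PySem.Int.mod x 10 := PySem.Int.mod_nonneg x (by norm_num)
    have hm10 : PySem.Int.mod x 10 < 10 := PySem.Int.mod_lt x (by norm_num)
    have hmN : (PySem.Int.mod x 10).toNat < 10 := by omega
    have hlen' : (counts.set (PySem.Int.mod x 10).toNat
        (counts.getD (PySem.Int.mod x 10).toNat 0 + 1)).length = 10 := by
      simp [hlen]
    obtain ⟨ihlen, ihget⟩ := ih _ hlen'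
    constructor
    · rw [pvCountsLoop, dif_pos h]; exact ihlen
    · intro i hi
      have hdx : pvDigits x = PySem.Int.mod x 10 :: pvDigits (PySem.Int.floordiv x 10) := by
        rw [pvDigits, dif_pos h]
      rw [pvCountsLoop, dif_pos h, hdx, ihget i hi, getD_set' _ _ _ _ _ (by omega),
        List.count_cons]
      have hc : (((PySem.Int.mod x 10).toNat : Nat) : Int) = PySem.Int.mod x 10 := by omega
      rcases eq_or_ne i (PySem.Int.mod x 10).toNat with rfl | hne
      · simp only [hc]
        simp
        omega
      · have h1 : PySem.Int.mod x 10 ≠ (i : Int) := by omega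
        rw [PySem.Int.mod_eq_emod_of_pos (by norm_num)] at h1
        rw [if_neg hne]
        simp [h1]
  | case2 x h =>
    intro counts hlen
    rw [pvCountsLoop, dif_neg h, pvDigits, dif_neg h]
    simp [hlen]

lemma pvBuild_pairwise (f : Int → Nat) (ds : List Int) (hds : ds.Pairwise (· ≤ ·)) :
    (ds.flatMap (fun d => List.replicate (f d) d)).Pairwise (· ≤ ·) := by
  induction ds with
  | nil => simp
  | cons d t ih =>
    rw [List.pairwise_cons] at hds
    simp only [List.flatMap_cons]
    rw [List.pairwise_append]
    refine ⟨List.pairwise_replicate.mpr (by simp), ih hds.2, ?_⟩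
    intro a ha b hb
    rcases List.mem_flatMap.mp hb with ⟨e, he, hbe⟩
    rw [List.eq_of_mem_replicate ha, List.eq_of_mem_replicate hbe]
    exact hds.1 e he

lemma pvBuild_count (f : Int → Nat) (a : Int) : ∀ ds : List Int, ds.Nodup →
    (ds.flatMap (fun d => List.replicate (f d) d)).count a = if a ∈ ds then f a else 0 := by
  intro ds
  induction ds with
  | nil => simp
  | cons d t ih =>
    intro hnd
    rw [List.nodup_cons] at hnd
    simp only [List.flatMap_cons, List.count_append, ih hnd.2, List.count_replicate]
    rcases eq_or_ne a d with rfl | hne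
    · simp [hnd.1]
    · simp [hne, Ne.symm hne]

-- the counting-sort output is a permutation of the digit list, in nondecreasing order
lemma main_eq (x : Int) (hx : x ≠ 0) : to_sorted_list x = to_sorted_list_alt x := by
  rw [to_sorted_list, to_sorted_list_alt, if_neg hx, if_neg hx]
  have hrange : PySem.List.pyRange 0 10 1 = [0,1,2,3,4,5,6,7,8,9] := by decide
  obtain ⟨hlen, hget⟩ := pvCountsLoop_getD x (List.replicate 10 0) (by simp)
  set counts := pvCountsLoop x (List.replicate 10 0) with hc
  have hgetD : ∀ i : Nat, i < 10 →
      counts.getD i 0 = ((pvDigits x).count (i : Int) : Int) := by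
    intro i hi
    rw [hget i hi, List.getD_replicate _ hi]
    ring
  have hbuild : (PySem.List.pyRange 0 10 1).foldl
      (fun res d => res ++ List.replicate (counts.getD d.toNat 0).toNat d) [] =
      ([0,1,2,3,4,5,6,7,8,9] : List Int).flatMap
        (fun d => List.replicate ((pvDigits x).count d) d) := by
    rw [hrange, PySem.List.foldl_append_eq_flatMap]
    simp only [List.nil_append]
    apply List.flatMap_congr
    intro d hd
    have hb : 0 ≤ d ∧ d < 10 := by simp at hd; omega
    have hv := hgetD d.toNat (by omega)
    have hcast : ((d.toNat : Nat) : Int) = d := by omega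
    rw [hcast] at hv
    rw [hv, Int.toNat_natCast]
  rw [pvDigitsLoopA_eq, List.nil_append, hbuild]
  apply PySem.List.sorted_id_eq_of_perm_of_pairwise
  · rw [List.perm_iff_count]
    intro a
    rw [pvBuild_count _ a _ (by decide)]
    by_cases ha : a ∈ ([0,1,2,3,4,5,6,7,8,9] : List Int)
    · simp [ha]
    · have : a ∉ pvDigits x := by
        intro hmem
        have := pvDigits_mem x a hmem
        simp at ha
        omega
      simp [ha, List.count_eq_zero_of_not_mem this]
  · exact pvBuild_pairwise _ _ (by decide)

-- ===== VERDICT (by name: the statement is the Claim_ definition above) =====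
theorem to_sorted_list_spec : Claim_equal_to_sorted_list := by
  intro x _
  unfold Spec_to_sorted_list
  rcases eq_or_ne x 0 with rfl | hx
  · rfl
  · exact main_eq x hx
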